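-- pv_equiv track=rewrite | github.com/carlapaula/smus_dev | bring_your_own_gdc_assets.py | _get_s3_subpaths
-- ===== SOURCE A (Python) =====
-- def _get_s3_subpaths(s3_path):
--     s3_path = s3_path.rstrip('/')
--     parts = s3_path.split('/')
--
--     paths = []
--     current = parts[0] + '//' + parts[2]  # s3://bucket
--     paths.append(current)
--
--     for part in parts[3:]:
--         current += '/' + part
--         paths.append(current)
--
--     return paths
-- ===== SOURCE B (Python) =====
-- def _get_s3_subpaths(s3_path):
--     parts = s3_path.rstrip('/').split('/')
--     base = parts[0] + '//' + parts[2]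
--     tail = parts[3:]
--     return ['/'.join([base] + tail[:i]) for i in range(len(tail) + 1)]
-- ===== Notes on version B (the rewrite author's own statement) =====
-- stated objective: alternative
-- what changed: B replaces A's running-accumulator single pass (extending one string and appending it after each component) by direct per-depth construction: each prefix is built independently as '/'.join([base] + tail[:i]) over a growing slice, O(n^2) instead of O(n) appends but no mutable running state.
import Mathlib
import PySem

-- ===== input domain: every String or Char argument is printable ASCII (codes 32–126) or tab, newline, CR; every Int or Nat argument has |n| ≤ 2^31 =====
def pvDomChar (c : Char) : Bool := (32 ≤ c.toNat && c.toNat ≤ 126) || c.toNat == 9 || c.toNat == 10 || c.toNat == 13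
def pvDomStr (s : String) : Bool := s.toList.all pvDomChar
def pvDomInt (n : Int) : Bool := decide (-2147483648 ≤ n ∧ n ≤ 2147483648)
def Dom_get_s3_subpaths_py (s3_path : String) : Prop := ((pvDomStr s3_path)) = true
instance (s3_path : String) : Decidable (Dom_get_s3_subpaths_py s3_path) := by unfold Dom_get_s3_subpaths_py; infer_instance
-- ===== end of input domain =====

-- B builds each prefix independently as '/'.join([base] + tail[:i]) instead of A's running accumulator; alternative decomposition, not faster.

-- ===== PORT A =====
-- primitive port of s.rstrip('/') (single strip char): removes exactly the trailing '/' characters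
def pvRstripSlashA (cs : List Char) : List Char := (cs.reverse.dropWhile (· == '/')).reverse

def get_s3_subpaths_py (s3_path : String) : List String :=
  let parts := PySem.Chars.splitOn (pvRstripSlashA s3_path.toList) ['/']
  match PySem.List.pyGet? parts 0, PySem.List.pyGet? parts 2 with
  | some p0, some p2 =>
    let current := p0 ++ ['/', '/'] ++ p2
    let st := (PySem.List.slice parts (some 3) none).foldl
      (fun (st : List Char × List (List Char)) part =>
        let cur := st.1 ++ ['/'] ++ part
        (cur, st.2 ++ [cur]))
      (current, [current])
    st.2.map String.ofList
  | _, _ => []   -- parts[0] / parts[2] raise IndexError in Python: excluded by Pre_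

-- ===== PORT B =====
-- B's own port of s.rstrip('/'), kept separate from A's helper
def pvRstripSlashB (cs : List Char) : List Char := (cs.reverse.dropWhile (· == '/')).reverse

def get_s3_subpaths_py_alt (s3_path : String) : List String :=
  let parts := PySem.Chars.splitOn (pvRstripSlashB s3_path.toList) ['/']
  match PySem.List.pyGet? parts 0 with
  | none => []       -- parts[0] raises IndexError in Python: excluded by Pre_
  | some p0 =>
    match PySem.List.pyGet? parts 2 with
    | none => []     -- parts[2] raises IndexError in Python: excluded by Pre_
    | some p2 =>
      let base := p0 ++ ['/', '/'] ++ p2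
      let tail := PySem.List.slice parts (some 3) none
      (PySem.List.pyRange 0 ((tail.length : Int) + 1)).map
        (fun i => String.ofList (PySem.Chars.join ['/'] (base :: PySem.List.slice tail none (some i))))

-- ===== PRECONDITION & SPEC =====
-- Pre_ excludes exactly the inputs where Python raises IndexError: fewer than three '/'-separated parts after rstrip.
def Pre_get_s3_subpaths_py (s3_path : String) : Prop :=
  3 ≤ (PySem.Chars.splitOn ((s3_path.toList.reverse.dropWhile (· == '/')).reverse) ['/']).length
instance (s3_path : String) : Decidable (Pre_get_s3_subpaths_py s3_path) := by unfold Pre_get_s3_subpaths_py; infer_instance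
def pvWitness_get_s3_subpaths_py : String := "s3://bucket/a"

def Spec_get_s3_subpaths_py (s3_path : String) (out : List String) : Prop := out = get_s3_subpaths_py_alt s3_path
instance (s3_path : String) (out : List String) : Decidable (Spec_get_s3_subpaths_py s3_path out) := by unfold Spec_get_s3_subpaths_py; infer_instance

-- ===== CLAIM (what is proved, stated in full; the proofs are below) =====
def Claim_equal_get_s3_subpaths_py : Prop := ∀ (s3_path : String), Dom_get_s3_subpaths_py s3_path → Pre_get_s3_subpaths_py s3_path → Spec_get_s3_subpaths_py s3_path (get_s3_subpaths_py s3_path)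

-- ===== LEMMAS AND PROOFS =====

-- merging the first two pieces of a join
theorem pv_join_merge (a b : List Char) (l : List (List Char)) :
    PySem.Chars.join ['/'] (a :: b :: l) = PySem.Chars.join ['/'] ((a ++ ['/'] ++ b) :: l) := by
  cases l with
  | nil => simp [PySem.Chars.join_cons_cons, PySem.Chars.join_singleton]
  | cons c cs =>
      rw [PySem.Chars.join_cons_cons, PySem.Chars.join_cons_cons, PySem.Chars.join_cons_cons]
      simp [List.append_assoc]

-- A's accumulator loop, characterised: the appended paths are the joins of the growing prefixes
theorem pv_fold_snd (tail : List (List Char)) : ∀ (cur : List Char) (acc : List (List Char)),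
    (tail.foldl (fun (st : List Char × List (List Char)) part =>
        (st.1 ++ ['/'] ++ part, st.2 ++ [st.1 ++ ['/'] ++ part])) (cur, acc)).2
    = acc ++ (List.range tail.length).map
        (fun i => PySem.Chars.join ['/'] (cur :: tail.take (i + 1))) := by
  induction tail with
  | nil => intro cur acc; simp
  | cons p ps ih =>
      intro cur acc
      have hr : (List.range (ps.length + 1)).map
            (fun i => PySem.Chars.join ['/'] (cur :: (p :: ps).take (i + 1)))
          = (cur ++ ['/'] ++ p) ::
            (List.range ps.length).map
              (fun i => PySem.Chars.join ['/'] ((cur ++ ['/'] ++ p) :: ps.take (i + 1))) := by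
        rw [List.range_succ_eq_map, List.map_cons, List.map_map]
        have htail : ∀ i ∈ List.range ps.length,
            ((fun i => PySem.Chars.join ['/'] (cur :: (p :: ps).take (i + 1))) ∘ Nat.succ) i
            = PySem.Chars.join ['/'] ((cur ++ ['/'] ++ p) :: ps.take (i + 1)) := by
          intro i _
          show PySem.Chars.join ['/'] (cur :: (p :: ps).take (i.succ + 1)) = _
          rw [List.take_succ_cons, pv_join_merge]
        rw [List.map_congr_left htail]
        simp [PySem.Chars.join_cons_cons, PySem.Chars.join_singleton]
      simp only [List.foldl_cons, List.length_cons]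
      rw [ih, hr]
      simp

theorem pv_main (base : List Char) (tail : List (List Char)) :
    (tail.foldl (fun (st : List Char × List (List Char)) part =>
        (st.1 ++ ['/'] ++ part, st.2 ++ [st.1 ++ ['/'] ++ part])) (base, [base])).2
    = (List.range (tail.length + 1)).map
        (fun i => PySem.Chars.join ['/'] (base :: tail.take i)) := by
  rw [pv_fold_snd, List.range_succ_eq_map]
  simp [PySem.Chars.join_singleton, List.map_map, Function.comp, Nat.succ_eq_add_one]

-- ===== VERDICT (by name: the statement is the Claim_ definition above) =====
theorem get_s3_subpaths_py_spec : Claim_equal_get_s3_subpaths_py := by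
  intro s _ hpre
  unfold Pre_get_s3_subpaths_py at hpre
  unfold Spec_get_s3_subpaths_py get_s3_subpaths_py get_s3_subpaths_py_alt
  simp only [pvRstripSlashA, pvRstripSlashB]
  have h0 : PySem.List.pyGet? (PySem.Chars.splitOn ((s.toList.reverse.dropWhile (· == '/')).reverse) ['/']) 0
      = some ((PySem.Chars.splitOn ((s.toList.reverse.dropWhile (· == '/')).reverse) ['/'])[0]'(by omega)) := by
    rw [show (0 : Int) = ((0 : Nat) : Int) from rfl, PySem.List.pyGet?_natCast]
    exact List.getElem?_eq_getElem (by omega)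
  have h2 : PySem.List.pyGet? (PySem.Chars.splitOn ((s.toList.reverse.dropWhile (· == '/')).reverse) ['/']) 2
      = some ((PySem.Chars.splitOn ((s.toList.reverse.dropWhile (· == '/')).reverse) ['/'])[2]'(by omega)) := by
    rw [show (2 : Int) = ((2 : Nat) : Int) from rfl, PySem.List.pyGet?_natCast]
    exact List.getElem?_eq_getElem (by omega)
  rw [h0, h2]
  simp only []
  generalize PySem.List.slice (PySem.Chars.splitOn ((s.toList.reverse.dropWhile (· == '/')).reverse) ['/']) (some 3) none = tail
  rw [pv_main]
  have hc : ((tail.length : Int) + 1) = ((tail.length + 1 : Nat) : Int) := by push_cast; ring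
  rw [hc, PySem.List.pyRange_zero_natCast, List.map_map, List.map_map]
  refine List.map_congr_left ?_
  intro k hk
  have hs : PySem.List.slice tail none (some (k : Int)) = tail.take k := by
    rw [PySem.List.slice_to tail (by positivity)]
    simp
  simp [Function.comp, hs]
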